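-- pv_equiv track=rewrite | github.com/viditjain88/Multi-Agent-Company-Research-Assistant | research_assistant/utils/mock_data.py | get_company_data
-- ===== SOURCE A (Python) =====
-- mock_research = {
--     "Apple Inc.": {
--         "recent_news": "Launched Vision Pro, expanding services revenue",
--         "stock_info": "Trading at $195, up 45% YTD",
--         "key_developments": "AI integration across product line"
--     },
--     "Apple": {
--         "recent_news": "Launched Vision Pro, expanding services revenue",
--         "stock_info": "Trading at $195, up 45% YTD",
--         "key_developments": "AI integration across product line"
--     },
--     "Tesla": {
--         "recent_news": "Cybertruck deliveries ramping up",
--         "stock_info": "Trading at $242, volatile quarter",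
--         "key_developments": "FSD v12 rollout, energy storage growth"
--     },
--     "Tesla Inc.": {
--         "recent_news": "Cybertruck deliveries ramping up",
--         "stock_info": "Trading at $242, volatile quarter",
--         "key_developments": "FSD v12 rollout, energy storage growth"
--     }
-- }
--
-- def get_company_data(company_name: str):
--     """
--     Retrieves mock data for a given company name.
--     Case-insensitive search.
--     """
--     normalized_name = company_name.strip()
--     # Simple direct match first
--     if normalized_name in mock_research:
--         return mock_research[normalized_name]
--
--     # Case insensitive match
--     for k, v in mock_research.items():
--         if k.lower() == normalized_name.lower():
--             return v
--
--     # Partial match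
--     for k, v in mock_research.items():
--         if normalized_name.lower() in k.lower() or k.lower() in normalized_name.lower():
--             return v
--
--     return None
-- ===== SOURCE B (Python) =====
-- mock_research = {
--     "Apple Inc.": {
--         "recent_news": "Launched Vision Pro, expanding services revenue",
--         "stock_info": "Trading at $195, up 45% YTD",
--         "key_developments": "AI integration across product line"
--     },
--     "Apple": {
--         "recent_news": "Launched Vision Pro, expanding services revenue",
--         "stock_info": "Trading at $195, up 45% YTD",
--         "key_developments": "AI integration across product line"
--     },
--     "Tesla": {
--         "recent_news": "Cybertruck deliveries ramping up",
--         "stock_info": "Trading at $242, volatile quarter",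
--         "key_developments": "FSD v12 rollout, energy storage growth"
--     },
--     "Tesla Inc.": {
--         "recent_news": "Cybertruck deliveries ramping up",
--         "stock_info": "Trading at $242, volatile quarter",
--         "key_developments": "FSD v12 rollout, energy storage growth"
--     }
-- }
--
-- def get_company_data(company_name: str):
--     """Single pass over mock_research keeping first-match slots for each tier."""
--     ns = company_name.strip()
--     nl = ns.lower()
--     exact = ci = partial = None
--     for k, v in mock_research.items():
--         kl = k.lower()
--         if exact is None and k == ns:
--             exact = v
--         if ci is None and kl == nl:
--             ci = v
--         if partial is None and (nl in kl or kl in nl):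
--             partial = v
--     if exact is not None:
--         return exact
--     if ci is not None:
--         return ci
--     return partial
-- ===== Notes on version B (the rewrite author's own statement) =====
-- stated objective: alternative
-- what changed: Replaces A's dict-membership check plus two sequential full scans with a single loop over the items that maintains three first-match slots (exact, case-insensitive, partial) and picks them by priority afterwards.
import Mathlib
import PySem

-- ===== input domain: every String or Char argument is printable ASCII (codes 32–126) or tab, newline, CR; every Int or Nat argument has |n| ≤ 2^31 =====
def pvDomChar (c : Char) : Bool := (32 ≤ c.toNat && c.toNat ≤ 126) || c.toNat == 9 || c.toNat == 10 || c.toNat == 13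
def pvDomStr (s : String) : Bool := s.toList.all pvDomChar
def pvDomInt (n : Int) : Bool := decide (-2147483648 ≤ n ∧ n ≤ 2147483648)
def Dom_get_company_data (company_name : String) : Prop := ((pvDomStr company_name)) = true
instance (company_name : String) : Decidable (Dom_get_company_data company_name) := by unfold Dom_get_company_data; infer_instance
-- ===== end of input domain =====

-- B is an alternative single-pass implementation: one loop over the items keeping
-- first-match slots for the exact / case-insensitive / partial tiers, instead of
-- A's membership check plus two further scans.

-- ===== PORT A =====
def appleData : List (String × String) :=
  [("recent_news", "Launched Vision Pro, expanding services revenue"),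
   ("stock_info", "Trading at $195, up 45% YTD"),
   ("key_developments", "AI integration across product line")]

def teslaData : List (String × String) :=
  [("recent_news", "Cybertruck deliveries ramping up"),
   ("stock_info", "Trading at $242, volatile quarter"),
   ("key_developments", "FSD v12 rollout, energy storage growth")]

def mock_research : PySem.Dict String (List (String × String)) :=
  ⟨[("Apple Inc.", appleData), ("Apple", appleData),
    ("Tesla", teslaData), ("Tesla Inc.", teslaData)]⟩

-- 'for k, v in mock_research.items(): if k.lower() == normalized_name.lower(): return v'
def aLoopCI (ns : String) : List (String × List (String × String)) → Option (List (String × String))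
  | [] => none
  | (k, v) :: rest =>
    if PySem.Str.lower k == PySem.Str.lower ns then some v else aLoopCI ns rest

-- 'for k, v in mock_research.items(): if … in … or … in …: return v'
def aLoopPartial (ns : String) : List (String × List (String × String)) → Option (List (String × String))
  | [] => none
  | (k, v) :: rest =>
    if PySem.Str.isIn (PySem.Str.lower ns) (PySem.Str.lower k)
       || PySem.Str.isIn (PySem.Str.lower k) (PySem.Str.lower ns) then some v
    else aLoopPartial ns rest

def get_company_data (company_name : String) : Option (List (String × String)) :=
  let normalized_name := PySem.Str.strip company_name
  match PySem.Dict.get? mock_research normalized_name with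
  | some v => some v                     -- 'if normalized_name in mock_research: return mock_research[normalized_name]'
  | none =>
    match aLoopCI normalized_name mock_research.items with
    | some v => some v
    | none => aLoopPartial normalized_name mock_research.items

-- ===== PORT B =====
-- one fold; each slot is set only while still None (first-wins)
def bStep (ns nl : String)
    (acc : Option (List (String × String)) × Option (List (String × String)) × Option (List (String × String)))
    (kv : String × List (String × String)) :
    Option (List (String × String)) × Option (List (String × String)) × Option (List (String × String)) :=
  let kl := PySem.Str.lower kv.1
  (if acc.1.isNone && (kv.1 == ns) then some kv.2 else acc.1,
   if acc.2.1.isNone && (kl == nl) then some kv.2 else acc.2.1,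
   if acc.2.2.isNone && (PySem.Str.isIn nl kl || PySem.Str.isIn kl nl) then some kv.2 else acc.2.2)

def get_company_data_alt (company_name : String) : Option (List (String × String)) :=
  let ns := PySem.Str.strip company_name
  let nl := PySem.Str.lower ns
  let acc := mock_research.items.foldl (bStep ns nl) (none, none, none)
  match acc.1 with
  | some v => some v
  | none =>
    match acc.2.1 with
    | some v => some v
    | none => acc.2.2

-- ===== PRECONDITION & SPEC =====
def Spec_get_company_data (company_name : String) (out : Option (List (String × String))) : Prop := out = get_company_data_alt company_name
instance (company_name : String) (out : Option (List (String × String))) : Decidable (Spec_get_company_data company_name out) := by unfold Spec_get_company_data; infer_instance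

-- ===== CLAIM (what is proved, stated in full; the proofs are below) =====
def Claim_equal_get_company_data : Prop := ∀ (company_name : String), Dom_get_company_data company_name → Spec_get_company_data company_name (get_company_data company_name)

-- ===== LEMMAS AND PROOFS =====

-- first value of an exact / case-insensitive / partial match, as a find?
def findE (ns : String) (l : List (String × List (String × String))) : Option (List (String × String)) :=
  (l.find? (fun p => p.1 == ns)).map (·.2)

def findC (nl : String) (l : List (String × List (String × String))) : Option (List (String × String)) :=
  (l.find? (fun p => PySem.Str.lower p.1 == nl)).map (·.2)

def findP (nl : String) (l : List (String × List (String × String))) : Option (List (String × String)) :=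
  (l.find? (fun p => PySem.Str.isIn nl (PySem.Str.lower p.1) || PySem.Str.isIn (PySem.Str.lower p.1) nl)).map (·.2)

theorem get?_eq_findE (ns : String) :
    PySem.Dict.get? mock_research ns = findE ns mock_research.items := rfl

theorem aLoopCI_eq_findC (ns : String) (l : List (String × List (String × String))) :
    aLoopCI ns l = findC (PySem.Str.lower ns) l := by
  induction l with
  | nil => rfl
  | cons kv t ih =>
    obtain ⟨k, v⟩ := kv
    simp only [aLoopCI, findC, List.find?_cons] at *
    by_cases h : (PySem.Str.lower k == PySem.Str.lower ns) <;> simp [h, ih]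

theorem aLoopPartial_eq_findP (ns : String) (l : List (String × List (String × String))) :
    aLoopPartial ns l = findP (PySem.Str.lower ns) l := by
  induction l with
  | nil => rfl
  | cons kv t ih =>
    obtain ⟨k, v⟩ := kv
    simp only [aLoopPartial, findP, List.find?_cons] at *
    cases hA : PySem.Str.isIn (PySem.Str.lower ns) (PySem.Str.lower k) <;>
      cases hB : PySem.Str.isIn (PySem.Str.lower k) (PySem.Str.lower ns) <;>
      simp_all

-- one step of one slot: set only while still none = first match first
theorem slotE (ns k : String) (v : List (String × String))
    (e : Option (List (String × String))) (t : List (String × List (String × String))) :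
    (if e.isNone && (k == ns) then some v else e).or (findE ns t) = e.or (findE ns ((k, v) :: t)) := by
  cases e <;> cases h : (k == ns) <;> simp [findE, h, Option.or]

theorem slotC (nl k : String) (v : List (String × String))
    (c : Option (List (String × String))) (t : List (String × List (String × String))) :
    (if c.isNone && (PySem.Str.lower k == nl) then some v else c).or (findC nl t) =
      c.or (findC nl ((k, v) :: t)) := by
  cases c <;> cases h : (PySem.Str.lower k == nl) <;> simp [findC, h, Option.or]

theorem slotP (nl k : String) (v : List (String × String))
    (p : Option (List (String × String))) (t : List (String × List (String × String))) :
    (if p.isNone && (PySem.Str.isIn nl (PySem.Str.lower k) || PySem.Str.isIn (PySem.Str.lower k) nl)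
       then some v else p).or (findP nl t) = p.or (findP nl ((k, v) :: t)) := by
  cases p <;>
    cases hA : PySem.Str.isIn nl (PySem.Str.lower k) <;>
    cases hB : PySem.Str.isIn (PySem.Str.lower k) nl <;>
    simp_all [findP, Option.or]

-- the single-pass invariant: each slot is its old value, else the first match in the rest
theorem foldl_bStep (ns nl : String) (l : List (String × List (String × String)))
    (e c p : Option (List (String × String))) :
    l.foldl (bStep ns nl) (e, c, p) = (e.or (findE ns l), c.or (findC nl l), p.or (findP nl l)) := by
  induction l generalizing e c p with
  | nil => simp [findE, findC, findP]
  | cons kv t ih =>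
    obtain ⟨k, v⟩ := kv
    rw [List.foldl_cons]
    simp only [bStep]
    rw [ih]
    simp only [Prod.mk.injEq]
    exact ⟨slotE ns k v e t, slotC nl k v c t, slotP nl k v p t⟩

-- ===== VERDICT (by name: the statement is the Claim_ definition above) =====
theorem get_company_data_spec : Claim_equal_get_company_data := by
  intro s _
  unfold Spec_get_company_data get_company_data get_company_data_alt
  simp only [get?_eq_findE, aLoopCI_eq_findC, aLoopPartial_eq_findP, foldl_bStep]
  simp [Option.or]
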